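-- pv_equiv track=rewrite | github.com/S-Sivahari/SynthoCAD | backend/step_editor/geometric_interpreter.py | _classify_planes
-- ===== SOURCE A (Python) =====
-- from typing import Dict, Any, List, Tuple, Optional
--
-- def _classify_planes(planes: List[Dict]) -> Dict[str, List[Dict]]:
--     """Group planes by orientation (horizontal, vertical_x, vertical_y)."""
--     groups = {
--         'horizontal': [],
--         'vertical_x': [],
--         'vertical_y': [],
--         'other': []
--     }
--
--     for plane in planes:
--         face_type = plane.get('face_type', 'other')
--         groups.get(face_type, groups['other']).append(plane)
--
--     return groups
-- ===== SOURCE B (Python) =====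
-- def _classify_planes(planes):
--     """Group planes by orientation via one filtering comprehension per bucket."""
--     known = ('horizontal', 'vertical_x', 'vertical_y')
--     groups = {k: [p for p in planes if p.get('face_type', 'other') == k] for k in known}
--     groups['other'] = [p for p in planes if p.get('face_type', 'other') not in known]
--     return groups
-- ===== Notes on version B (the rewrite author's own statement) =====
-- stated objective: simpler
-- what changed: Replaces the single mutating dispatch loop over a pre-built dict with one declarative filter per bucket (a dict comprehension over the three known keys plus a not-in filter for 'other'), eliminating the aliased-default-list append trick.
import Mathlib
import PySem

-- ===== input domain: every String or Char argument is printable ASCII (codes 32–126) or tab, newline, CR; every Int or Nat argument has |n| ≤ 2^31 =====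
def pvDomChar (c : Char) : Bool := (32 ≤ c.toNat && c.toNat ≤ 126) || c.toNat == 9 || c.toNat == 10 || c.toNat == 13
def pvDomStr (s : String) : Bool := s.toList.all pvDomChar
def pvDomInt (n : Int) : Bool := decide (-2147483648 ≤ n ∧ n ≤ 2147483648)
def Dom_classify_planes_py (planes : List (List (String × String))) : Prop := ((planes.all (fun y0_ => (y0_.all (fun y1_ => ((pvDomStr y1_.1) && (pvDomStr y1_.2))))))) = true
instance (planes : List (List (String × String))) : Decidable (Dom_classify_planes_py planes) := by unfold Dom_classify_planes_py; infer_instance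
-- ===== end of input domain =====

-- B changes A's single mutating dispatch loop into one filter per bucket; objective: simpler.

-- ===== PORT A =====
-- plane.get('face_type', 'other'): first-match association-list lookup with a default
def aPlaneGet (p : List (String × String)) (k d : String) : String :=
  match p with
  | [] => d
  | (k', v) :: rest => if k' == k then v else aPlaneGet rest k d

-- the loop body: groups.get(face_type, groups['other']).append(plane)
-- (appending through the aliased dict value mutates bucket face_type if present, else bucket 'other')
def aStep (groups : PySem.Dict String (List (List (String × String)))) (plane : List (String × String)) :
    PySem.Dict String (List (List (String × String))) :=
  let face_type := aPlaneGet plane "face_type" "other"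
  if groups.contains face_type then groups.modify face_type [] (fun l => l ++ [plane])
  else groups.modify "other" [] (fun l => l ++ [plane])

def classify_planes_py (planes : List (List (String × String))) : List (String × List (List (String × String))) :=
  let groups : PySem.Dict String (List (List (String × String))) :=
    PySem.Dict.ofList [("horizontal", []), ("vertical_x", []), ("vertical_y", []), ("other", [])]
  (planes.foldl aStep groups).items

-- ===== PORT B =====
def bFaceType (p : List (String × String)) : String :=
  match p with
  | [] => "other"
  | (k', v) :: rest => if k' == "face_type" then v else bFaceType rest

def classify_planes_py_alt (planes : List (List (String × String))) : List (String × List (List (String × String))) :=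
  [("horizontal", planes.filter (fun p => bFaceType p == "horizontal")),
   ("vertical_x", planes.filter (fun p => bFaceType p == "vertical_x")),
   ("vertical_y", planes.filter (fun p => bFaceType p == "vertical_y")),
   ("other", planes.filter (fun p =>
      !(bFaceType p == "horizontal" || bFaceType p == "vertical_x" || bFaceType p == "vertical_y")))]

-- ===== PRECONDITION & SPEC =====
def Spec_classify_planes_py (planes : List (List (String × String))) (out : List (String × List (List (String × String)))) : Prop := out = classify_planes_py_alt planes
instance (planes : List (List (String × String))) (out : List (String × List (List (String × String)))) : Decidable (Spec_classify_planes_py planes out) := by unfold Spec_classify_planes_py; infer_instance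

-- ===== CLAIM (what is proved, stated in full; the proofs are below) =====
def Claim_equal_classify_planes_py : Prop := ∀ (planes : List (List (String × String))), Dom_classify_planes_py planes → Spec_classify_planes_py planes (classify_planes_py planes)

-- ===== LEMMAS AND PROOFS =====

theorem aPlaneGet_eq_bFaceType (p : List (String × String)) :
    aPlaneGet p "face_type" "other" = bFaceType p := by
  induction p with
  | nil => rfl
  | cons hd tl ih =>
    obtain ⟨k', v⟩ := hd
    simp only [aPlaneGet, bFaceType]
    split <;> simp [ih]

-- loop invariant: the fold over a 4-bucket dict appends each plane to its bucket
theorem aLoop_items (planes : List (List (String × String)))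
    (h x y o : List (List (String × String))) :
    (planes.foldl aStep (PySem.Dict.mk
        [("horizontal", h), ("vertical_x", x), ("vertical_y", y), ("other", o)])).items =
    [("horizontal", h ++ planes.filter (fun p => bFaceType p == "horizontal")),
     ("vertical_x", x ++ planes.filter (fun p => bFaceType p == "vertical_x")),
     ("vertical_y", y ++ planes.filter (fun p => bFaceType p == "vertical_y")),
     ("other", o ++ planes.filter (fun p =>
        !(bFaceType p == "horizontal" || bFaceType p == "vertical_x" || bFaceType p == "vertical_y")))] := by
  induction planes generalizing h x y o with
  | nil => simp
  | cons p rest ih =>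
    simp only [List.foldl_cons]
    have hstep : aStep (PySem.Dict.mk
        [("horizontal", h), ("vertical_x", x), ("vertical_y", y), ("other", o)]) p =
      (if bFaceType p == "horizontal" then
        PySem.Dict.mk [("horizontal", h ++ [p]), ("vertical_x", x), ("vertical_y", y), ("other", o)]
       else if bFaceType p == "vertical_x" then
        PySem.Dict.mk [("horizontal", h), ("vertical_x", x ++ [p]), ("vertical_y", y), ("other", o)]
       else if bFaceType p == "vertical_y" then
        PySem.Dict.mk [("horizontal", h), ("vertical_x", x), ("vertical_y", y ++ [p]), ("other", o)]
       else
        PySem.Dict.mk [("horizontal", h), ("vertical_x", x), ("vertical_y", y), ("other", o ++ [p])]) := by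
      simp only [aStep, aPlaneGet_eq_bFaceType]
      by_cases h1 : bFaceType p = "horizontal" <;>
        by_cases h2 : bFaceType p = "vertical_x" <;>
          by_cases h3 : bFaceType p = "vertical_y" <;>
            by_cases h4 : bFaceType p = "other" <;>
              simp_all [PySem.Dict.contains, PySem.Dict.modify, PySem.Dict.get?, PySem.Dict.insert,
                PySem.Dict.getD];
              (intro hc; rcases hc with hc | hc | hc | hc <;> simp_all)
    rw [hstep]
    by_cases h1 : bFaceType p = "horizontal" <;>
      by_cases h2 : bFaceType p = "vertical_x" <;>
        by_cases h3 : bFaceType p = "vertical_y" <;>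
          simp_all

-- ===== VERDICT (by name: the statement is the Claim_ definition above) =====
theorem classify_planes_py_spec : Claim_equal_classify_planes_py := by
  intro planes _
  unfold Spec_classify_planes_py classify_planes_py classify_planes_py_alt
  have h0 : PySem.Dict.ofList
      ([("horizontal", []), ("vertical_x", []), ("vertical_y", []), ("other", [])] :
        List (String × List (List (String × String)))) =
      PySem.Dict.mk [("horizontal", []), ("vertical_x", []), ("vertical_y", []), ("other", [])] := by
    rfl
  simp only [h0, aLoop_items, List.nil_append]
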